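-- pv_equiv track=rewrite | github.com/ursakumeljfaks/Prakticna-matematika | 1.letnik/programiranje1/vaje/24 rekurzija-in-os/PythonOSRek/test1a/podM1-B/vmesni_obratni.py | poisci
-- ===== SOURCE A (Python) =====
-- def poisci(vmesni,obratni):
--     '''poišče vse možne rešitve, če se zadnji v obratnem
--        ponovi večkrat. Vedno obstaja vsaj ena rešitev,
--        ni pa nuju, da jih je več kot ena'''
--     sez = []
--     koren = obratni[-1] # poiščemo koren, ki je zadnji v obratnem
--     for i,vrednost in enumerate (vmesni):
--         if vrednost == koren: # piščemo element v vmesnem, ki je enak korenu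
--             # razdelimo na levega in desnega
--             vmesL = vmesni[:i]
--             obratL = obratni[:i]
--
--             # drevo bo imelo veljavni vmesni in obratni pregled
--             # če bodo vsi elementi iz vmesnega v obratnem
--             # in število elementov bo v obeh seznamih enako
--
--             if sorted(vmesL) == sorted(obratL):
--                 # če bo veljavni levi bo tudi desni
--                 vmesD = vmesni[i+1:]
--                 obratD = obratni[i:-1]
--                 sez += [[vmesL,obratL,vmesD,obratD]]
--
--     return sez
-- ===== SOURCE B (Python) =====
-- def poisci(vmesni, obratni):
--     """One pass: an incremental balance counter over the growing prefixes
--     replaces re-sorting both prefixes at every root occurrence."""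
--     koren = obratni[-1]
--     bal = {}        # bal[k] = count of k in vmesni[:i] minus count of k in obratni[:i]
--     mismatch = 0    # number of keys with nonzero balance
--     sez = []
--     for i, v in enumerate(vmesni):
--         if mismatch == 0 and v == koren:
--             sez.append([vmesni[:i], obratni[:i], vmesni[i + 1:], obratni[i:-1]])
--         c = bal.get(v, 0)
--         if c == 0:
--             mismatch += 1
--         c += 1
--         if c == 0:
--             mismatch -= 1
--         bal[v] = c
--         if i < len(obratni):
--             o = obratni[i]
--             c = bal.get(o, 0)
--             if c == 0:
--                 mismatch += 1
--             c -= 1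
--             if c == 0:
--                 mismatch -= 1
--             bal[o] = c
--     return sez
-- ===== Notes on version B (the rewrite author's own statement) =====
-- stated objective: faster
-- what changed: A re-sorts both prefixes (sorted(vmesni[:i]) == sorted(obratni[:i])) at every occurrence of the root; B makes one pass keeping a dict of count differences between the two growing prefixes plus a counter of keys with nonzero balance, so each multiset-equality test is an O(1) check of that counter.
import Mathlib
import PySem

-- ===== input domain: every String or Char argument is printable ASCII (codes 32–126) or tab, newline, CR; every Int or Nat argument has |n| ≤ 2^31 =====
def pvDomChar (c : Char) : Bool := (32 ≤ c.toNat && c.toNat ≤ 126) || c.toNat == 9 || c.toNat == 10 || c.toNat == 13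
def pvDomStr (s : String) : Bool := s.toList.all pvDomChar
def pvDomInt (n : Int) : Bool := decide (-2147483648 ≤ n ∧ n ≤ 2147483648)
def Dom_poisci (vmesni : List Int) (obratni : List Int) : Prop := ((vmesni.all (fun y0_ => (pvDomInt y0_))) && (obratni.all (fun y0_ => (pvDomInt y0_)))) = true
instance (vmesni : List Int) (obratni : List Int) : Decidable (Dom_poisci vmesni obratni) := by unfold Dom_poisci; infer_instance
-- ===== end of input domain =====

-- B replaces A's re-sorting of both prefixes at every root occurrence by one incremental
-- multiset-balance dictionary maintained over the growing prefixes (objective: faster).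

-- ===== PORT A =====
-- body of A's 'for i,vrednost in enumerate(vmesni)' loop
def bodyA (vmesni obratni : List Int) (koren : Int)
    (sez : List (List (List Int))) (iv : Int × Int) : List (List (List Int)) :=
  if iv.2 = koren then
    let vmesL := PySem.List.slice vmesni none (some iv.1)
    let obratL := PySem.List.slice obratni none (some iv.1)
    if PySem.List.sorted vmesL (fun x => x) false = PySem.List.sorted obratL (fun x => x) false then
      let vmesD := PySem.List.slice vmesni (some (iv.1 + 1)) none
      let obratD := PySem.List.slice obratni (some iv.1) (some (-1))
      sez ++ [[vmesL, obratL, vmesD, obratD]]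
    else sez
  else sez

def poisci (vmesni : List Int) (obratni : List Int) : List (List (List Int)) :=
  match PySem.List.pyGet? obratni (-1) with
  | none => []  -- Python raises IndexError here (obratni = []); excluded by Pre_poisci
  | some koren => (PySem.List.enumerate vmesni).foldl (bodyA vmesni obratni koren) []

-- ===== PORT B =====
-- port of Source B's helper _upd: one balance-counter update, returns the new (bal, mismatch)
def updB (st : PySem.Dict Int Int × Int) (x d : Int) : PySem.Dict Int Int × Int :=
  let c := st.1.getD x 0
  let m1 := if c = 0 then st.2 + 1 else st.2
  let c1 := c + d
  let m2 := if c1 = 0 then m1 - 1 else m1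
  (st.1.insert x c1, m2)

-- body of B's 'for i, v in enumerate(vmesni)' loop; state = (bal, mismatch, sez)
def bodyB (vmesni obratni : List Int) (koren : Int)
    (st : PySem.Dict Int Int × Int × List (List (List Int))) (iv : Int × Int) :
    PySem.Dict Int Int × Int × List (List (List Int)) :=
  let i := iv.1
  let v := iv.2
  let sez1 :=
    if st.2.1 = 0 ∧ v = koren then
      st.2.2 ++ [[PySem.List.slice vmesni none (some i),
                  PySem.List.slice obratni none (some i),
                  PySem.List.slice vmesni (some (i + 1)) none,
                  PySem.List.slice obratni (some i) (some (-1))]]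
    else st.2.2
  let st1 := updB (st.1, st.2.1) v 1
  if i < (obratni.length : Int) then
    match PySem.List.pyGet? obratni i with
    | some o => let st2 := updB st1 o (-1); (st2.1, st2.2, sez1)
    | none => (st1.1, st1.2, sez1)  -- unreachable: 0 ≤ i < len(obratni)
  else (st1.1, st1.2, sez1)

def poisci_alt (vmesni : List Int) (obratni : List Int) : List (List (List Int)) :=
  match PySem.List.pyGet? obratni (-1) with
  | none => []  -- Python raises IndexError here (obratni = []); excluded by Pre_poisci
  | some koren =>
    ((PySem.List.enumerate vmesni).foldl (bodyB vmesni obratni koren)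
      (PySem.Dict.empty, 0, [])).2.2

-- ===== PRECONDITION & SPEC =====
-- Pre_ excludes only obratni = [], where the Python A raises IndexError on obratni[-1]
def Pre_poisci (vmesni : List Int) (obratni : List Int) : Prop := obratni ≠ []
instance (vmesni : List Int) (obratni : List Int) : Decidable (Pre_poisci vmesni obratni) := by
  unfold Pre_poisci; infer_instance
def pvWitness_poisci : List Int × List Int := ([1, 2, 1], [2, 1, 1])

def Spec_poisci (vmesni : List Int) (obratni : List Int) (out : List (List (List Int))) : Prop :=
  out = poisci_alt vmesni obratni
instance (vmesni : List Int) (obratni : List Int) (out : List (List (List Int))) :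
    Decidable (Spec_poisci vmesni obratni out) := by unfold Spec_poisci; infer_instance

-- ===== CLAIM (what is proved, stated in full; the proofs are below) =====
def Claim_equal_poisci : Prop := ∀ (vmesni : List Int) (obratni : List Int),
  Dom_poisci vmesni obratni → Pre_poisci vmesni obratni →
  Spec_poisci vmesni obratni (poisci vmesni obratni)

-- ===== LEMMAS AND PROOFS =====

-- loop invariant of B: keys are distinct, bal holds the prefix count differences,
-- and mismatch counts the entries of bal with nonzero balance
def BInv (ob pre : List Int) (bal : PySem.Dict Int Int) (m : Int) : Prop :=
  (bal.items.map Prod.fst).Nodup ∧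
  (∀ k, bal.getD k 0 = (pre.count k : Int) - ((ob.take pre.length).count k : Int)) ∧
  m = (bal.items.countP (fun p => decide (p.2 ≠ 0)) : Int)

lemma find?_eq_of_mem_nodup :
    ∀ (l : List (Int × Int)), (l.map Prod.fst).Nodup → ∀ p ∈ l,
      l.find? (fun q => q.1 == p.1) = some p := by
  intro l
  induction l with
  | nil => intro _ p hp; cases hp
  | cons q t ih =>
    intro hn p hp
    simp only [List.map_cons, List.nodup_cons] at hn
    by_cases hq : q.1 = p.1
    · have hpq : p = q := by
        rcases List.mem_cons.mp hp with h | h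
        · exact h
        · exact absurd (List.mem_map.mpr ⟨p, h, rfl⟩) (hq ▸ hn.1)
      subst hpq
      simp [List.find?_cons]
    · rcases List.mem_cons.mp hp with h | h
      · exact absurd (h ▸ rfl) hq
      · rw [List.find?_cons_of_neg (by simp [hq])]
        exact ih hn.2 p h

lemma all_zero_iff_getD_zero (l : List (Int × Int)) (hn : (l.map Prod.fst).Nodup) :
    (∀ p ∈ l, p.2 = 0) ↔ ∀ k : Int, (PySem.Dict.mk l).getD k 0 = 0 := by
  constructor
  · intro h k
    unfold PySem.Dict.getD PySem.Dict.get?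
    cases hf : l.find? (fun q => q.1 == k) with
    | none => simp
    | some q =>
      have hm : q ∈ l := List.mem_of_find?_eq_some hf
      simp [h q hm]
  · intro h p hp
    have hq := h p.1
    unfold PySem.Dict.getD PySem.Dict.get? at hq
    rw [find?_eq_of_mem_nodup l hn p hp] at hq
    simpa using hq

lemma split_of_contains :
    ∀ (l : List (Int × Int)) (x : Int), (l.any (fun p => p.1 == x)) = true →
      (l.map Prod.fst).Nodup →
      ∃ l1 c l2, l = l1 ++ (x, c) :: l2 ∧ (∀ p ∈ l1, p.1 ≠ x) ∧ (∀ p ∈ l2, p.1 ≠ x) := by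
  intro l
  induction l with
  | nil => intro x h; simp at h
  | cons q t ih =>
    intro x h hn
    simp only [List.map_cons, List.nodup_cons] at hn
    by_cases hq : q.1 = x
    · refine ⟨[], q.2, t, ?_, by simp, ?_⟩
      · simp [← hq]
      · intro p hp hpx
        exact hn.1 (by simpa [hpx, hq] using List.mem_map_of_mem (f := Prod.fst) hp)
    · have h' : t.any (fun p => p.1 == x) = true := by
        simp only [List.any_cons] at h
        simpa [hq] using h
      obtain ⟨l1, c, l2, he, h1, h2⟩ := ih x h' hn.2
      exact ⟨q :: l1, c, l2, by simp [he], by simpa [hq] using h1, h2⟩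

lemma getD_mk_append_self (l1 l2 : List (Int × Int)) (x c : Int) (h1 : ∀ p ∈ l1, p.1 ≠ x) :
    (PySem.Dict.mk (l1 ++ (x, c) :: l2)).getD x 0 = c := by
  unfold PySem.Dict.getD PySem.Dict.get?
  rw [List.find?_append]
  have hnone : l1.find? (fun q => q.1 == x) = none :=
    List.find?_eq_none.mpr (fun p hp => by simp [h1 p hp])
  simp [hnone]

lemma getD_mk_append_of_ne (l1 l2 : List (Int × Int)) (x c k : Int) (hk : k ≠ x) :
    (PySem.Dict.mk (l1 ++ (x, c) :: l2)).getD k 0 = (PySem.Dict.mk (l1 ++ l2)).getD k 0 := by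
  unfold PySem.Dict.getD PySem.Dict.get?
  rw [List.find?_append, List.find?_append, List.find?_cons_of_neg (by simp [Ne.symm hk])]

-- countP of the replaced-entry list, with the nonzero indicator split out
lemma countP_mid (l1 l2 : List (Int × Int)) (x v : Int) :
    (((l1 ++ (x, v) :: l2).countP (fun p => decide (p.2 ≠ 0)) : Int))
      = (l1.countP (fun p => decide (p.2 ≠ 0)) : Int)
        + (l2.countP (fun p => decide (p.2 ≠ 0)) : Int)
        + (if v = 0 then 0 else 1) := by
  by_cases hv : v = 0 <;> simp [List.countP_append, List.countP_cons, hv] <;> push_cast <;> ring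

-- the single balance-counter update preserves the three parts of the invariant
lemma updB_spec (bal : PySem.Dict Int Int) (hn : (bal.items.map Prod.fst).Nodup)
    (x d m : Int) :
    ((updB (bal, m) x d).1.items.map Prod.fst).Nodup ∧
    (∀ k, (updB (bal, m) x d).1.getD k 0 =
        (if k = x then bal.getD x 0 + d else bal.getD k 0)) ∧
    (m = (bal.items.countP (fun p => decide (p.2 ≠ 0)) : Int) →
      (updB (bal, m) x d).2 =
        ((updB (bal, m) x d).1.items.countP (fun p => decide (p.2 ≠ 0)) : Int)) := by
  by_cases hc : bal.contains x = true
  · -- key present: the entry is overwritten in place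
    obtain ⟨l1, c, l2, he, h1, h2⟩ := split_of_contains bal.items x hc hn
    have hbal : bal = PySem.Dict.mk (l1 ++ (x, c) :: l2) := by
      cases bal; simp_all
    subst hbal
    simp only [PySem.Dict.items] at h1 h2 hn ⊢
    have hgx : (PySem.Dict.mk (l1 ++ (x, c) :: l2)).getD x 0 = c :=
      getD_mk_append_self l1 l2 x c h1
    have hmap1 : ∀ v : Int, l1.map (fun p => if (p.1 == x) = true then (x, v) else p) = l1 := by
      intro v
      conv_rhs => rw [← List.map_id l1]
      exact List.map_congr_left (fun p hp => by simp [h1 p hp])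
    have hmap2 : ∀ v : Int, l2.map (fun p => if (p.1 == x) = true then (x, v) else p) = l2 := by
      intro v
      conv_rhs => rw [← List.map_id l2]
      exact List.map_congr_left (fun p hp => by simp [h2 p hp])
    have hins : ∀ v : Int, (PySem.Dict.mk (l1 ++ (x, c) :: l2)).insert x v =
        PySem.Dict.mk (l1 ++ (x, v) :: l2) := by
      intro v
      unfold PySem.Dict.insert
      rw [if_pos hc]
      congr 1
      simp only [PySem.Dict.items, List.map_append, List.map_cons, hmap1 v, hmap2 v]
      simp
    refine ⟨?_, ?_, ?_⟩
    · simp only [updB, hgx, hins]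
      simpa using hn
    · intro k
      simp only [updB, hgx, hins]
      by_cases hk : k = x
      · subst hk
        rw [getD_mk_append_self l1 l2 k (c + d) h1]
        simp
      · rw [if_neg hk, getD_mk_append_of_ne l1 l2 x (c + d) k hk,
            getD_mk_append_of_ne l1 l2 x c k hk]
    · intro hm
      simp only [updB, hgx, hins]
      rw [hm]
      have e1 := countP_mid l1 l2 x c
      have e2 := countP_mid l1 l2 x (c + d)
      split_ifs at e1 e2 ⊢ <;> omega
  · -- new key: appended at the end
    have hkeys : ∀ p ∈ bal.items, p.1 ≠ x := by
      intro p hp hpx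
      exact hc (List.any_eq_true.mpr ⟨p, hp, by simp [hpx]⟩)
    have hgx : bal.getD x 0 = 0 := by
      unfold PySem.Dict.getD PySem.Dict.get?
      have hnone : bal.items.find? (fun q => q.1 == x) = none :=
        List.find?_eq_none.mpr (fun p hp => by simp [hkeys p hp])
      simp [hnone]
    have hnotmem : x ∉ bal.items.map Prod.fst := by
      intro hx
      obtain ⟨p, hp, hpe⟩ := List.mem_map.mp hx
      exact hkeys p hp hpe
    have hins : ∀ v : Int, (bal.insert x v).items = bal.items ++ [(x, v)] := by
      intro v
      unfold PySem.Dict.insert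
      rw [if_neg hc]
    refine ⟨?_, ?_, ?_⟩
    · simp only [updB, hins, List.map_append, List.map_cons, List.map_nil]
      exact hn.append (List.nodup_singleton x)
        (fun a ha hb => hnotmem ((List.mem_singleton.mp hb) ▸ ha))
    · intro k
      by_cases hk : k = x
      · subst hk
        simp only [updB]
        rw [PySem.Dict.getD_insert_self]
        simp
      · simp only [updB]
        rw [PySem.Dict.getD_insert_of_ne _ _ _ hk, if_neg hk]
    · intro hm
      simp only [updB, hgx, hm]
      rw [hins, List.countP_append]
      simp only [List.countP_cons, List.countP_nil]
      by_cases hd : (0 : Int) + d = 0 <;> simp [hd] <;> push_cast <;> omega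

lemma m_zero_iff (ob pre : List Int) (bal : PySem.Dict Int Int) (m : Int)
    (h : BInv ob pre bal m) : (m = 0 ↔ pre.Perm (ob.take pre.length)) := by
  obtain ⟨hn, hg, hm⟩ := h
  have hbal : bal = PySem.Dict.mk bal.items := by cases bal; rfl
  constructor
  · intro h0
    rw [List.perm_iff_count]
    intro a
    have hcp : bal.items.countP (fun p => decide (p.2 ≠ 0)) = 0 := by omega
    have hz : ∀ p ∈ bal.items, p.2 = 0 := by
      intro p hp
      have hcp2 := List.countP_eq_zero.mp hcp p hp
      simpa using hcp2
    have hga := (all_zero_iff_getD_zero bal.items hn).mp hz a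
    rw [← hbal] at hga
    have hgb := hg a
    omega
  · intro hperm
    have hcount := List.perm_iff_count.mp hperm
    have hz : ∀ p ∈ bal.items, p.2 = 0 := by
      apply (all_zero_iff_getD_zero bal.items hn).mpr
      intro k
      rw [← hbal, hg k, hcount k]
      omega
    have hcp : bal.items.countP (fun p => decide (p.2 ≠ 0)) = 0 :=
      List.countP_eq_zero.mpr (fun p hp => by simp [hz p hp])
    omega

lemma loop_eq (vm ob : List Int) (koren : Int) :
    ∀ (suf pre : List Int) (bal : PySem.Dict Int Int) (m : Int)
      (acc : List (List (List Int))),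
      vm = pre ++ suf → BInv ob pre bal m →
      (PySem.List.enumerate suf (pre.length : Int)).foldl (bodyA vm ob koren) acc
      = ((PySem.List.enumerate suf (pre.length : Int)).foldl (bodyB vm ob koren)
          (bal, m, acc)).2.2 := by
  intro suf
  induction suf with
  | nil => intro pre bal m acc _ _; simp [PySem.List.enumerate]
  | cons x suf ih =>
    intro pre bal m acc hvm hInv
    rw [PySem.List.enumerate_cons]
    simp only [List.foldl_cons]
    have htake : vm.take pre.length = pre := by rw [hvm]; exact List.take_left
    have hcond : (PySem.List.sorted (PySem.List.slice vm none (some (pre.length : Int)))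
          (fun x => x) false
        = PySem.List.sorted (PySem.List.slice ob none (some (pre.length : Int)))
          (fun x => x) false) ↔ m = 0 := by
      rw [PySem.List.slice_to_natCast, PySem.List.slice_to_natCast, htake,
          PySem.List.sorted_id_eq_sorted_id_iff_perm,
          ← m_zero_iff ob pre bal m hInv]
    -- the third component of B's state is always the (possibly extended) output list
    have hB22 : ∀ (st : PySem.Dict Int Int × Int × List (List (List Int))) (iv : Int × Int),
        (bodyB vm ob koren st iv).2.2 =
          if st.2.1 = 0 ∧ iv.2 = koren then
            st.2.2 ++ [[PySem.List.slice vm none (some iv.1),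
                        PySem.List.slice ob none (some iv.1),
                        PySem.List.slice vm (some (iv.1 + 1)) none,
                        PySem.List.slice ob (some iv.1) (some (-1))]]
          else st.2.2 := by
      intro st iv
      simp only [bodyB, updB]
      split <;> (try split) <;> rfl
    -- the element both loops append (or not) at this position
    have hA : bodyA vm ob koren acc ((pre.length : Int), x)
        = (bodyB vm ob koren (bal, m, acc) ((pre.length : Int), x)).2.2 := by
      rw [hB22]
      simp only [bodyA]
      by_cases hx : x = koren
      · by_cases hm0 : m = 0
        · rw [if_pos hx, if_pos (hcond.mpr hm0),
              if_pos (show m = 0 ∧ x = koren from ⟨hm0, hx⟩)]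
        · rw [if_pos hx, if_neg (fun h => hm0 (hcond.mp h)),
              if_neg (fun h : m = 0 ∧ x = koren => hm0 h.1)]
      · rw [if_neg hx, if_neg (fun h : m = 0 ∧ x = koren => hx h.2)]
    obtain ⟨hn, hg, hm⟩ := hInv
    have h1 := updB_spec bal hn x 1 m
    have hlenx : (pre ++ [x]).length = pre.length + 1 := by simp
    have hBInv' : BInv ob (pre ++ [x])
        (bodyB vm ob koren (bal, m, acc) ((pre.length : Int), x)).1
        (bodyB vm ob koren (bal, m, acc) ((pre.length : Int), x)).2.1 := by
      by_cases hlt : pre.length < ob.length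
      · have hget : PySem.List.pyGet? ob (pre.length : Int) = some ob[pre.length] := by
          rw [PySem.List.pyGet?_natCast]
          exact List.getElem?_eq_getElem hlt
        have h2 := updB_spec (updB (bal, m) x 1).1 h1.1 ob[pre.length] (-1)
          (updB (bal, m) x 1).2
        have hred : bodyB vm ob koren (bal, m, acc) ((pre.length : Int), x)
            = ((updB (updB (bal, m) x 1) ob[pre.length] (-1)).1,
               (updB (updB (bal, m) x 1) ob[pre.length] (-1)).2,
               (bodyB vm ob koren (bal, m, acc) ((pre.length : Int), x)).2.2) := by
          simp only [bodyB]
          rw [if_pos (show ((pre.length : Int), x).1 < (ob.length : Int) from (by exact_mod_cast hlt : (pre.length : Int) < (ob.length : Int)))]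
          rw [hget]
        rw [hred]
        have htk : ob.take (pre.length + 1) = ob.take pre.length ++ [ob[pre.length]] := by
          rw [List.take_add_one, List.getElem?_eq_getElem hlt]
          rfl
        refine ⟨h2.1, ?_, h2.2.2 (h1.2.2 hm)⟩
        generalize ho : ob[pre.length] = o at htk h2
        intro k
        rw [h2.2.1 k, hlenx, htk]
        rw [h1.2.1 o, h1.2.1 k]
        have hgk := hg k
        by_cases hkx : k = x <;> by_cases hko : k = o
        · subst hkx; subst hko
          rw [if_pos rfl, if_pos rfl]
          simp only [List.count_append]
          have e2 : [k].count k = 1 := by simp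
          rw [e2]
          push_cast
          omega
        · subst hkx
          rw [if_neg hko, if_pos rfl]
          simp only [List.count_append]
          have e1 : [k].count k = 1 := by simp
          have e2 : [o].count k = 0 := by rw [List.count_eq_zero]; simp [hko]
          rw [e1, e2]
          push_cast
          omega
        · subst hko
          rw [if_pos rfl, if_neg (fun h : k = x => hkx h)]
          simp only [List.count_append]
          have e1 : [x].count k = 0 := by rw [List.count_eq_zero]; simp [hkx]
          have e2 : [k].count k = 1 := by simp
          rw [e1, e2]
          push_cast
          omega
        · rw [if_neg hko, if_neg hkx]
          simp only [List.count_append]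
          have e1 : [x].count k = 0 := by rw [List.count_eq_zero]; simp [hkx]
          have e2 : [o].count k = 0 := by rw [List.count_eq_zero]; simp [hko]
          rw [e1, e2]
          push_cast
          omega
      · have hred : bodyB vm ob koren (bal, m, acc) ((pre.length : Int), x)
            = ((updB (bal, m) x 1).1, (updB (bal, m) x 1).2,
               (bodyB vm ob koren (bal, m, acc) ((pre.length : Int), x)).2.2) := by
          simp only [bodyB]
          rw [if_neg (show ¬ ((pre.length : Int), x).1 < (ob.length : Int) from (by exact_mod_cast hlt : ¬ (pre.length : Int) < (ob.length : Int)))]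
        rw [hred]
        have htk : ob.take (pre.length + 1) = ob.take pre.length := by
          rw [List.take_of_length_le (by omega), List.take_of_length_le (by omega)]
        refine ⟨h1.1, ?_, h1.2.2 hm⟩
        intro k
        rw [h1.2.1 k, hlenx, htk]
        have hgk := hg k
        by_cases hkx : k = x
        · subst hkx
          rw [if_pos rfl]
          simp only [List.count_append]
          have e2 : [k].count k = 1 := by simp
          rw [e2]
          push_cast
          omega
        · rw [if_neg hkx]
          simp only [List.count_append]
          have e1 : [x].count k = 0 := by rw [List.count_eq_zero]; simp [hkx]
          rw [e1]
          push_cast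
          omega
    rw [hA]
    have hcast : (pre.length : Int) + 1 = (((pre ++ [x]).length : Nat) : Int) := by
      simp
    rw [hcast]
    rw [show (bodyB vm ob koren (bal, m, acc) ((pre.length : Int), x))
        = ((bodyB vm ob koren (bal, m, acc) ((pre.length : Int), x)).1,
           (bodyB vm ob koren (bal, m, acc) ((pre.length : Int), x)).2.1,
           (bodyB vm ob koren (bal, m, acc) ((pre.length : Int), x)).2.2) from rfl]
    exact ih (pre ++ [x]) _ _ _ (by simp [hvm]) hBInv'

lemma binv_init (ob : List Int) : BInv ob [] PySem.Dict.empty 0 := by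
  refine ⟨by simp [PySem.Dict.empty], ?_, by simp [PySem.Dict.empty]⟩
  intro k
  simp [PySem.Dict.empty, PySem.Dict.getD, PySem.Dict.get?]

-- ===== VERDICT (by name: the statement is the Claim_ definition above) =====
theorem poisci_spec : Claim_equal_poisci := by
  intro vmesni obratni _ _
  unfold Spec_poisci
  cases hk : PySem.List.pyGet? obratni (-1) with
  | none => simp [poisci, poisci_alt, hk]
  | some koren =>
    simp only [poisci, poisci_alt, hk]
    have hmain := loop_eq vmesni obratni koren vmesni [] PySem.Dict.empty 0 [] (by simp)
      (binv_init obratni)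
    simpa using hmain
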